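-- pv_equiv track=rewrite | github.com/Cigilipuf/whitehathackerai | src/tools/scanners/waf_strategy.py | _html_entity_mix
-- ===== SOURCE A (Python) =====
-- def _html_entity_mix(payload: str) -> str:
--     """Mix HTML entities with literal chars (encode every other special)."""
--     specials = set("<>\"'&/")
--     result: list[str] = []
--     toggle = False
--     for ch in payload:
--         if ch in specials:
--             toggle = not toggle
--             result.append(f"&#{ord(ch)};" if toggle else ch)
--         else:
--             result.append(ch)
--     return "".join(result)
-- ===== SOURCE B (Python) =====
-- def _html_entity_mix(payload: str) -> str:
--     """Mix HTML entities with literal chars (encode every other special)."""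
--     specials = "<>\"'&/"
--     cs = list(payload)
--     pieces = [
--         f"&#{ord(ch)};"
--         if ch in specials and sum(c in specials for c in cs[:i]) % 2 == 0
--         else ch
--         for i, ch in enumerate(cs)
--     ]
--     return "".join(pieces)
-- ===== Notes on version B (the rewrite author's own statement) =====
-- stated objective: alternative
-- what changed: Replaces the stateful toggle loop by a stateless per-position rule: a character is encoded iff it is special and the number of specials strictly before it is even, computed from a prefix slice inside a single comprehension.
import Mathlib
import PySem

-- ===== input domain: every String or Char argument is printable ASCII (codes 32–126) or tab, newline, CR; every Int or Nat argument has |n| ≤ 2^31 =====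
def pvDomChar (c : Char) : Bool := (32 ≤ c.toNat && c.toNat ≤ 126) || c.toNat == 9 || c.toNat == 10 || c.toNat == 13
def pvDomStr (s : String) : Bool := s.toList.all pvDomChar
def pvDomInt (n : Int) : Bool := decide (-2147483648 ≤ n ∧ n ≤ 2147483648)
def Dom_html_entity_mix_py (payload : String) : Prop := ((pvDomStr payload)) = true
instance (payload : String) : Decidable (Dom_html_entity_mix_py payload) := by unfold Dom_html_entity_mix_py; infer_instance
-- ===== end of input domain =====

-- B replaces A's stateful toggle loop by a stateless per-position rule (encode a special iff
-- the count of specials before it is even) — an alternative decomposition, not faster.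

-- ===== PORT A =====
-- ch in specials, where specials = set("<>\"'&/") (exact: membership of a char in a 6-char set)
def pvSpecial (c : Char) : Bool :=
  c == '<' || c == '>' || c == '"' || c == '\'' || c == '&' || c == '/'

-- f"&#{ord(ch)};"
def pvEnc (c : Char) : String :=
  String.ofList ('&' :: '#' :: PySem.Int.toChars ((c.toNat : Int)) ++ [';'])

-- the body of A's for-loop: state = (toggle, result)
def pvStepA (st : Bool × List String) (ch : Char) : Bool × List String :=
  if pvSpecial ch then
    (!st.1, st.2 ++ [if !st.1 then pvEnc ch else String.ofList [ch]])
  else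
    (st.1, st.2 ++ [String.ofList [ch]])

def html_entity_mix_py (payload : String) : String :=
  PySem.Str.join "" (payload.toList.foldl pvStepA (false, [])).2

-- ===== PORT B =====
-- the comprehension body of Source B; sum(c in specials for c in cs[:i]) is ported as the length of
-- the filtered prefix slice (exact: a Python sum of bools counts the True elements).
def pvPieceB (cs : List Char) (p : Int × Char) : String :=
  if pvSpecial p.2 &&
      (((PySem.List.slice cs none (some p.1)).filter pvSpecial).length % 2 == 0)
  then pvEnc p.2 else String.ofList [p.2]

def html_entity_mix_py_alt (payload : String) : String :=
  PySem.Str.join "" ((PySem.List.enumerate payload.toList).map (pvPieceB payload.toList))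

-- ===== PRECONDITION & SPEC =====
def Spec_html_entity_mix_py (payload : String) (out : String) : Prop := out = html_entity_mix_py_alt payload
instance (payload : String) (out : String) : Decidable (Spec_html_entity_mix_py payload out) := by unfold Spec_html_entity_mix_py; infer_instance

-- ===== CLAIM (what is proved, stated in full; the proofs are below) =====
def Claim_equal_html_entity_mix_py : Prop := ∀ (payload : String), Dom_html_entity_mix_py payload → Spec_html_entity_mix_py payload (html_entity_mix_py payload)

-- ===== LEMMAS AND PROOFS =====

-- The common value of both passes: structural recursion carrying the toggle.
def pvMix (t : Bool) : List Char → List String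
  | [] => []
  | c :: cs =>
    if pvSpecial c then (if !t then pvEnc c else String.ofList [c]) :: pvMix (!t) cs
    else String.ofList [c] :: pvMix t cs

lemma pvFoldA (cs : List Char) : ∀ (t : Bool) (acc : List String),
    (cs.foldl pvStepA (t, acc)).2 = acc ++ pvMix t cs := by
  induction cs with
  | nil => intro t acc; simp [pvMix]
  | cons c cs ih =>
    intro t acc
    rw [List.foldl_cons]
    by_cases h : pvSpecial c = true
    · rw [show pvStepA (t, acc) c
          = (!t, acc ++ [if !t then pvEnc c else String.ofList [c]]) from by simp [pvStepA, h]]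
      rw [ih, pvMix, if_pos h, List.append_assoc]; rfl
    · rw [show pvStepA (t, acc) c = (t, acc ++ [String.ofList [c]]) from by simp [pvStepA, h]]
      rw [ih, pvMix, if_neg h, List.append_assoc]; rfl

lemma pvParityFlip (n : Nat) : ((n + 1) % 2 == 1) = !(n % 2 == 1) := by
  rcases Nat.even_or_odd n with he | ho
  · rw [Nat.even_iff] at he; simp [Nat.add_mod, he]
  · rw [Nat.odd_iff] at ho; simp [Nat.add_mod, ho]

lemma pvParityNot (n : Nat) : (n % 2 == 0) = !(n % 2 == 1) := by
  rcases Nat.even_or_odd n with he | ho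
  · rw [Nat.even_iff] at he; simp [he]
  · rw [Nat.odd_iff] at ho; simp [ho]

lemma pvMapB (cs : List Char) : ∀ (pre : List Char),
    (PySem.List.enumerate cs ((pre.length : Int))).map (pvPieceB (pre ++ cs))
      = pvMix ((pre.filter pvSpecial).length % 2 == 1) cs := by
  induction cs with
  | nil => intro pre; simp [PySem.List.enumerate_nil, pvMix]
  | cons c cs ih =>
    intro pre
    rw [PySem.List.enumerate_cons, List.map_cons]
    have h1 : pvPieceB (pre ++ c :: cs) ((pre.length : Int), c)
        = (if pvSpecial c && ((pre.filter pvSpecial).length % 2 == 0)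
           then pvEnc c else String.ofList [c]) := by
      unfold pvPieceB
      rw [show PySem.List.slice (pre ++ c :: cs) none (some ((pre.length : Int)))
          = pre from by rw [PySem.List.slice_to_natCast]; simp]
    have h2 : ((pre.length : Int) + 1) = (((pre ++ [c]).length : Nat) : Int) := by
      simp
    have h3 := ih (pre ++ [c])
    rw [List.append_assoc] at h3
    simp only [List.cons_append, List.nil_append] at h3
    rw [h1, h2, h3]
    by_cases h : pvSpecial c = true
    · have hcnt : ((pre ++ [c]).filter pvSpecial).length = (pre.filter pvSpecial).length + 1 := by
        simp [List.filter_append, h]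
      rw [hcnt, pvParityFlip, pvMix, if_pos h, pvParityNot]
      simp [h]
    · have hcnt : ((pre ++ [c]).filter pvSpecial).length = (pre.filter pvSpecial).length := by
        simp [List.filter_append, h]
      rw [hcnt, pvMix, if_neg h]
      simp [h]

-- ===== VERDICT (by name: the statement is the Claim_ definition above) =====
theorem html_entity_mix_py_spec : Claim_equal_html_entity_mix_py := by
  intro payload _
  show html_entity_mix_py payload = html_entity_mix_py_alt payload
  unfold html_entity_mix_py html_entity_mix_py_alt
  have hB := pvMapB payload.toList []
  simp only [List.nil_append, List.length_nil, Nat.cast_zero, List.filter_nil] at hB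
  rw [pvFoldA, List.nil_append]
  rw [show PySem.List.enumerate payload.toList
      = PySem.List.enumerate payload.toList 0 from rfl, hB]
  rfl
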